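-- pv_equiv track=rewrite | github.com/Aishvarya-Pec/CodeSaviour-2.0 | server/app.py | apply_unified_diff
-- ===== SOURCE A (Python) =====
-- from typing import Optional, List, Tuple
--
-- def apply_unified_diff(original: str, diff_text: str) -> Optional[str]:
--     """Very basic unified diff applier for single-file diffs. Returns new content or None.
--     Supports context (' '), removals ('-'), additions ('+'). Ignores hunk ranges.
--     """
--     lines = original.splitlines()
--     new_lines: List[str] = []
--     i = 0
--     in_hunk = False
--     for raw in diff_text.splitlines():
--         if raw.startswith("--- ") or raw.startswith("+++ "):
--             # headers ignored
--             continue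
--         if raw.startswith("@@"):
--             in_hunk = True
--             continue
--         if not in_hunk:
--             # ignore any preamble
--             continue
--         if raw.startswith(" "):
--             ctx = raw[1:]
--             if i >= len(lines):
--                 return None
--             if lines[i] != ctx:
--                 # context mismatch
--                 return None
--             new_lines.append(lines[i])
--             i += 1
--         elif raw.startswith("-"):
--             del_line = raw[1:]
--             if i >= len(lines):
--                 return None
--             if lines[i] != del_line:
--                 return None
--             # skip the original line (deleted)
--             i += 1
--         elif raw.startswith("+"):
--             add_line = raw[1:]
--             new_lines.append(add_line)
--         else:
--             # unknown marker, ignore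
--             continue
--     # append remaining original lines
--     if i < len(lines):
--         new_lines.extend(lines[i:])
--     return "\n".join(new_lines)
-- ===== SOURCE B (Python) =====
-- from typing import Optional, List, Tuple
--
-- def apply_unified_diff(original: str, diff_text: str) -> Optional[str]:
--     """Two-pass re-implementation: first parse the diff into a flat list of
--     (kind, text) operations (same skip rules: headers, '@@' markers, preamble,
--     unknown markers), then apply the operations to the original lines."""
--     ops: List[Tuple[str, str]] = []
--     in_hunk = False
--     for raw in diff_text.splitlines():
--         if raw.startswith("--- ") or raw.startswith("+++ "):
--             continue
--         if raw.startswith("@@"):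
--             in_hunk = True
--         elif in_hunk:
--             if raw.startswith(" "):
--                 ops.append(("ctx", raw[1:]))
--             elif raw.startswith("-"):
--                 ops.append(("del", raw[1:]))
--             elif raw.startswith("+"):
--                 ops.append(("add", raw[1:]))
--     lines = original.splitlines()
--     out: List[str] = []
--     i = 0
--     for kind, text in ops:
--         if kind == "add":
--             out.append(text)
--         else:
--             if i >= len(lines) or lines[i] != text:
--                 return None
--             if kind == "ctx":
--                 out.append(lines[i])
--             i += 1
--     out.extend(lines[i:])
--     return "\n".join(out)
-- ===== Notes on version B (the rewrite author's own statement) =====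
-- stated objective: alternative
-- what changed: Replaced A's single fused loop (stateful scan of the diff that simultaneously parses markers and edits the original) with a two-pass design: a parse pass producing an explicit list of (ctx/del/add) operations, then an apply pass folding those operations over the original lines.
import Mathlib
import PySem

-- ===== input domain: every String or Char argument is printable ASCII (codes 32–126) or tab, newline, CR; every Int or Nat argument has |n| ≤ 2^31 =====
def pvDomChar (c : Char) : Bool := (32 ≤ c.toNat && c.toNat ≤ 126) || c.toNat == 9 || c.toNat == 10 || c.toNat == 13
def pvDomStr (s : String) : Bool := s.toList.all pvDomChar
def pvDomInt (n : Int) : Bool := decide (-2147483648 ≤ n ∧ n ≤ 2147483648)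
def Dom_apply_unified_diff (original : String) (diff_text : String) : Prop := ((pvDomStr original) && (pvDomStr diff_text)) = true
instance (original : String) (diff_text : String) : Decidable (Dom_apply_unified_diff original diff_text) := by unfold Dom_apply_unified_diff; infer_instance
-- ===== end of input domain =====

-- B replaces A's single fused parse-and-edit loop with a two-pass design (parse to an
-- explicit operation list, then apply it); same cost, proved to return the same value.

-- ===== PORT A =====
-- A's single loop over the diff lines, carrying (new_lines, i, in_hunk).
def pvALoop (lines : List String) (ds : List String) (acc : List String) (i : Nat)
    (inHunk : Bool) : Option String :=
  match ds with
  | [] =>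
      -- 'if i < len(lines): new_lines.extend(lines[i:])' then join
      some (PySem.Str.join "\n" (if i < lines.length then acc ++ lines.drop i else acc))
  | raw :: rest =>
      if PySem.Str.startswith raw "--- " || PySem.Str.startswith raw "+++ " then
        pvALoop lines rest acc i inHunk
      else if PySem.Str.startswith raw "@@" then
        pvALoop lines rest acc i true
      else if !inHunk then
        pvALoop lines rest acc i inHunk
      else if PySem.Str.startswith raw " " then
        let ctx := PySem.Str.slice raw (some 1) none
        match lines[i]? with      -- none ⟺ 'i >= len(lines): return None'
        | none => none
        | some l => if l ≠ ctx then none else pvALoop lines rest (acc ++ [l]) (i + 1) inHunk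
      else if PySem.Str.startswith raw "-" then
        let delLine := PySem.Str.slice raw (some 1) none
        match lines[i]? with
        | none => none
        | some l => if l ≠ delLine then none else pvALoop lines rest acc (i + 1) inHunk
      else if PySem.Str.startswith raw "+" then
        pvALoop lines rest (acc ++ [PySem.Str.slice raw (some 1) none]) i inHunk
      else
        pvALoop lines rest acc i inHunk

def apply_unified_diff (original : String) (diff_text : String) : Option String :=
  pvALoop (PySem.Str.splitlines original) (PySem.Str.splitlines diff_text) [] 0 false

-- ===== PORT B =====
inductive PvOp where
  | ctx : String → PvOp
  | del : String → PvOp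
  | add : String → PvOp
deriving DecidableEq, Repr

-- pass 1 of Source B: parse the diff lines into an operation list
def pvParse (ds : List String) (inHunk : Bool) : List PvOp :=
  match ds with
  | [] => []
  | raw :: rest =>
      if PySem.Str.startswith raw "--- " || PySem.Str.startswith raw "+++ " then
        pvParse rest inHunk
      else if PySem.Str.startswith raw "@@" then
        pvParse rest true
      else if inHunk then
        if PySem.Str.startswith raw " " then
          PvOp.ctx (PySem.Str.slice raw (some 1) none) :: pvParse rest inHunk
        else if PySem.Str.startswith raw "-" then
          PvOp.del (PySem.Str.slice raw (some 1) none) :: pvParse rest inHunk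
        else if PySem.Str.startswith raw "+" then
          PvOp.add (PySem.Str.slice raw (some 1) none) :: pvParse rest inHunk
        else
          pvParse rest inHunk
      else
        pvParse rest inHunk

-- pass 2 of Source B: apply the operations to the original lines
def pvApply (ops : List PvOp) (lines : List String) (out : List String) (i : Nat) :
    Option String :=
  match ops with
  | [] => some (PySem.Str.join "\n" (out ++ lines.drop i))
  | PvOp.add t :: rest => pvApply rest lines (out ++ [t]) i
  | PvOp.ctx t :: rest =>
      match lines[i]? with
      | none => none
      | some l => if l ≠ t then none else pvApply rest lines (out ++ [l]) (i + 1)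
  | PvOp.del t :: rest =>
      match lines[i]? with
      | none => none
      | some l => if l ≠ t then none else pvApply rest lines out (i + 1)

def apply_unified_diff_alt (original : String) (diff_text : String) : Option String :=
  pvApply (pvParse (PySem.Str.splitlines diff_text) false) (PySem.Str.splitlines original) [] 0

-- ===== PRECONDITION & SPEC =====
def Spec_apply_unified_diff (original : String) (diff_text : String) (out : Option String) : Prop := out = apply_unified_diff_alt original diff_text
instance (original : String) (diff_text : String) (out : Option String) : Decidable (Spec_apply_unified_diff original diff_text out) := by unfold Spec_apply_unified_diff; infer_instance

-- ===== CLAIM (what is proved, stated in full; the proofs are below) =====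
def Claim_equal_apply_unified_diff : Prop := ∀ (original : String) (diff_text : String), Dom_apply_unified_diff original diff_text → Spec_apply_unified_diff original diff_text (apply_unified_diff original diff_text)

-- ===== LEMMAS AND PROOFS =====

-- A's fused loop equals B's apply pass run on B's parsed operation list.
theorem pvALoop_eq_apply (ds : List String) :
    ∀ (lines acc : List String) (i : Nat) (inHunk : Bool),
      pvALoop lines ds acc i inHunk = pvApply (pvParse ds inHunk) lines acc i := by
  induction ds with
  | nil =>
      intro lines acc i inHunk
      by_cases h : i < lines.length
      · simp [pvALoop, pvParse, pvApply, h]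
      · simp [pvALoop, pvParse, pvApply, h, List.drop_eq_nil_of_le (Nat.le_of_not_lt h)]
  | cons raw rest ih =>
      intro lines acc i inHunk
      cases inHunk with
      | false =>
          simp only [pvALoop, pvParse, Bool.not_false]
          split_ifs <;> first | contradiction | simp [ih]
      | true =>
          simp only [pvALoop, pvParse, Bool.not_true]
          split_ifs <;>
            first
              | contradiction
              | exact ih _ _ _ _
              | (simp [ih]; done)
              | (simp only [pvApply]
                 cases lines[i]? with
                 | none => rfl
                 | some l =>
                     by_cases hl : l = PySem.Str.slice raw (some 1) none <;> simp [hl, ih])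

-- ===== VERDICT (by name: the statement is the Claim_ definition above) =====
theorem apply_unified_diff_spec : Claim_equal_apply_unified_diff := by
  intro original diff_text _
  unfold Spec_apply_unified_diff apply_unified_diff apply_unified_diff_alt
  exact pvALoop_eq_apply _ _ _ _ _
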